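-- pv_equiv track=rewrite | github.com/paiml/depyler | examples/hard_graph_patterns.py | bfs_level_sizes
-- ===== SOURCE A (Python) =====
-- def bfs_distances(graph: dict[int, list[int]], start: int) -> dict[int, int]:
--     """BFS from start node, returns distances to all reachable nodes."""
--     dist: dict[int, int] = {start: 0}
--     queue: list[int] = [start]
--     head: int = 0
--     while head < len(queue):
--         node: int = queue[head]
--         head = head + 1
--         if node in graph:
--             neighbors: list[int] = graph[node]
--             i: int = 0
--             while i < len(neighbors):
--                 nb: int = neighbors[i]
--                 if nb not in dist:
--                     dist[nb] = dist[node] + 1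
--                     queue.append(nb)
--                 i = i + 1
--     return dist
--
-- def bfs_level_sizes(graph: dict[int, list[int]], start: int) -> list[int]:
--     """Return the number of nodes at each BFS level from start."""
--     dist: dict[int, int] = bfs_distances(graph, start)
--     if len(dist) == 0:
--         return []
--     max_dist: int = 0
--     for node in dist:
--         d: int = dist[node]
--         if d > max_dist:
--             max_dist = d
--     sizes: list[int] = []
--     level: int = 0
--     while level <= max_dist:
--         sizes.append(0)
--         level = level + 1
--     for node in dist:
--         d2: int = dist[node]
--         sizes[d2] = sizes[d2] + 1
--     return sizes
-- ===== SOURCE B (Python) =====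
-- def bfs_level_sizes(graph: dict[int, list[int]], start: int) -> list[int]:
--     """Return the number of nodes at each BFS level from start."""
--     visited = {start}
--     frontier = [start]
--     sizes: list[int] = []
--     while frontier:
--         sizes.append(len(frontier))
--         nxt: list[int] = []
--         for node in frontier:
--             for nb in graph.get(node, []):
--                 if nb not in visited:
--                     visited.add(nb)
--                     nxt.append(nb)
--         frontier = nxt
--     return sizes
-- ===== Notes on version B (the rewrite author's own statement) =====
-- stated objective: simpler
-- what changed: B replaces A's three-pass design (build a full node-to-distance dict by queue BFS, then scan it for the max distance, then scan it again to bucket-count) with a single level-synchronous BFS that keeps only a frontier list and a visited set and emits len(frontier) once per layer.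
import Mathlib
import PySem

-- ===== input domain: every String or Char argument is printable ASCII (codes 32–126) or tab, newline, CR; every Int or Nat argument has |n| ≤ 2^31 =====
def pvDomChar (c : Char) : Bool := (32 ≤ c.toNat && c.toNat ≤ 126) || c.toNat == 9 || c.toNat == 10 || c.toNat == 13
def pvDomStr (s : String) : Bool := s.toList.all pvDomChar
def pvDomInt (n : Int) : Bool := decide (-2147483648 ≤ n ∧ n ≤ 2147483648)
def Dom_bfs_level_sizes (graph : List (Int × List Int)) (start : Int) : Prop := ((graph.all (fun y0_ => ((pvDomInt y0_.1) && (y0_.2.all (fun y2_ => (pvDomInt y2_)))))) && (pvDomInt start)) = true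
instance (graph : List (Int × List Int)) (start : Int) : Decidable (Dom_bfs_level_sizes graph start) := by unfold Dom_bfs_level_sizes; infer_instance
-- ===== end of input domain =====

-- B replaces A's dict-of-distances BFS plus two counting passes by a single level-synchronous
-- frontier BFS that emits one count per layer (objective: simpler); same return value is proved.


-- ===== PORT A =====
-- A's dict access: Python's "node in graph … graph[node]" (first-match lookup).
def pvGraphGet (graph : List (Int × List Int)) (node : Int) : Option (List Int) :=
  PySem.Dict.get? (PySem.Dict.mk graph) node

-- Termination device (not part of the Python): a duplicate-free universe of all
-- nodes that can ever be enqueued (the start node and every neighbour).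
def pvUni (graph : List (Int × List Int)) (start : Int) : List Int :=
  PySem.Set.ofList (start :: graph.flatMap (fun p => p.2))

-- Invariant carried by A's BFS loop, used only for its termination measure.
def pvInvA (graph : List (Int × List Int)) (start : Int) (dist : PySem.Dict Int Int) : Prop :=
  dist.keys.Nodup ∧ ∀ k ∈ dist.keys, k ∈ pvUni graph start

-- body of A's inner 'while i < len(neighbors)' loop: 'if nb not in dist: dist[nb] = dist[node]+1; queue.append(nb)'
-- (node is always a key of dist when this runs, so getD's default 0 is never used).
def pvStepA (node : Int) (s : PySem.Dict Int Int × List Int) (nb : Int) :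
    PySem.Dict Int Int × List Int :=
  if s.1.contains nb then s
  else (s.1.insert nb (s.1.getD node 0 + 1), s.2 ++ [nb])

-- one iteration of A's outer 'while head < len(queue)' loop, returning the updated dist
-- and the nodes this iteration appended to the queue.
def pvExpandA (graph : List (Int × List Int)) (dist : PySem.Dict Int Int) (node : Int) :
    PySem.Dict Int Int × List Int :=
  match pvGraphGet graph node with
  | none => (dist, [])
  | some neighbors => neighbors.foldl (pvStepA node) (dist, [])

lemma pvStart_mem_uni (graph : List (Int × List Int)) (start : Int) : start ∈ pvUni graph start := by
  unfold pvUni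
  rw [PySem.Set.mem_ofList]
  exact List.mem_cons_self

lemma pvGraphGet_sub (graph : List (Int × List Int)) (start node : Int) {nbs : List Int}
    (h : pvGraphGet graph node = some nbs) : ∀ x ∈ nbs, x ∈ pvUni graph start := by
  intro x hx
  unfold pvUni
  rw [PySem.Set.mem_ofList]
  have hmem : (node, nbs) ∈ graph := PySem.Dict.mem_items_of_get?_eq_some _ h
  exact List.mem_cons_of_mem _ (List.mem_flatMap.mpr ⟨(node, nbs), hmem, hx⟩)

-- The inner fold appends some fresh pairs: enough for invariant and termination.
lemma pvFoldA_weak (node : Int) (l : List Int) :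
    ∀ (d : PySem.Dict Int Int) (acc : List Int),
    ∃ Δ : List (Int × Int),
      (l.foldl (pvStepA node) (d, acc)).1.items = d.items ++ Δ ∧
      (l.foldl (pvStepA node) (d, acc)).2 = acc ++ Δ.map Prod.fst ∧
      (Δ.map Prod.fst).Nodup ∧
      (∀ p ∈ Δ, p.1 ∈ l ∧ p.1 ∉ d.keys) := by
  induction l with
  | nil => intro d acc; exact ⟨[], by simp⟩
  | cons nb t ih =>
    intro d acc
    simp only [List.foldl_cons]
    by_cases hc : d.contains nb = true
    · have hstep : pvStepA node (d, acc) nb = (d, acc) := by simp [pvStepA, hc]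
      rw [hstep]
      obtain ⟨Δ, h1, h2, h3, h4⟩ := ih d acc
      exact ⟨Δ, h1, h2, h3, fun p hp => ⟨List.mem_cons_of_mem _ (h4 p hp).1, (h4 p hp).2⟩⟩
    · have hc' : d.contains nb = false := by simpa using hc
      have hnb : nb ∉ d.keys := by
        intro hmem
        exact hc ((PySem.Dict.contains_iff_mem_keys d nb).mpr hmem)
      have hstep : pvStepA node (d, acc) nb =
          (d.insert nb (d.getD node 0 + 1), acc ++ [nb]) := by
        simp [pvStepA, hc']
      rw [hstep]
      obtain ⟨Δ, h1, h2, h3, h4⟩ := ih (d.insert nb (d.getD node 0 + 1)) (acc ++ [nb])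
      have hkeys : (d.insert nb (d.getD node 0 + 1)).keys = d.keys ++ [nb] :=
        PySem.Dict.keys_insert_of_not_contains d _ hc'
      refine ⟨(nb, d.getD node 0 + 1) :: Δ, ?_, ?_, ?_, ?_⟩
      · rw [h1, PySem.Dict.items_insert_of_not_contains d _ hc']
        simp
      · rw [h2]; simp
      · simp only [List.map_cons, List.nodup_cons]
        refine ⟨?_, h3⟩
        intro hmem
        obtain ⟨p, hp, hfst⟩ := List.mem_map.mp hmem
        have := (h4 p hp).2
        rw [hkeys] at this
        exact this (by simp [hfst])
      · intro p hp
        rcases List.mem_cons.mp hp with h | h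
        · subst h; exact ⟨List.mem_cons_self, hnb⟩
        · have h5 := h4 p h
          rw [hkeys] at h5
          refine ⟨List.mem_cons_of_mem _ h5.1, fun hk => h5.2 (by simp [hk])⟩

lemma pvExpandA_spec (graph : List (Int × List Int)) (start node : Int)
    (d : PySem.Dict Int Int) (h : pvInvA graph start d) :
    pvInvA graph start (pvExpandA graph d node).1 ∧
    (pvExpandA graph d node).1.size = d.size + (pvExpandA graph d node).2.length := by
  unfold pvExpandA
  cases hG : pvGraphGet graph node with
  | none => exact ⟨h, by simp⟩
  | some nbs =>
    obtain ⟨Δ, h1, h2, h3, h4⟩ := pvFoldA_weak node nbs d []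
    have hkeys : (nbs.foldl (pvStepA node) (d, [])).1.keys = d.keys ++ Δ.map Prod.fst := by
      simp only [PySem.Dict.keys, h1, List.map_append]
    constructor
    · constructor
      · rw [hkeys]
        refine List.Nodup.append h.1 h3 ?_
        intro x hx hx'
        obtain ⟨p, hp, hfst⟩ := List.mem_map.mp hx'
        exact (h4 p hp).2 (hfst ▸ hx)
      · intro k hk
        rw [hkeys] at hk
        rcases List.mem_append.mp hk with hk | hk
        · exact h.2 k hk
        · obtain ⟨p, hp, hfst⟩ := List.mem_map.mp hk
          exact hfst ▸ pvGraphGet_sub graph start node hG p.1 (h4 p hp).1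
    · simp only [PySem.Dict.size, h1, h2, List.length_append, List.nil_append,
        List.length_map]

lemma pvInvA_size_le (graph : List (Int × List Int)) (start : Int) (d : PySem.Dict Int Int)
    (h : pvInvA graph start d) : d.size ≤ (pvUni graph start).length := by
  have : d.keys.length ≤ (pvUni graph start).length :=
    (List.subperm_of_subset h.1 (fun x hx => h.2 x hx)).length_le
  simpa [PySem.Dict.size, PySem.Dict.keys] using this

-- A's outer loop: 'pending' is queue[head:], the only part of the queue ever read.
def pvLoopA (graph : List (Int × List Int)) (start : Int) (pending : List Int)
    (dist : PySem.Dict Int Int) (h : pvInvA graph start dist) : PySem.Dict Int Int :=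
  match pending with
  | [] => dist
  | node :: rest =>
      pvLoopA graph start (rest ++ (pvExpandA graph dist node).2) (pvExpandA graph dist node).1
        ((pvExpandA_spec graph start node dist h).1)
termination_by 2 * ((pvUni graph start).length + 1 - dist.size) + pending.length
decreasing_by
  have hs := pvExpandA_spec graph start node dist h
  have h1 := pvInvA_size_le graph start _ hs.1
  have h2 := pvInvA_size_le graph start _ h
  simp only [List.length_append, List.length_cons]
  omega

-- Python helper bfs_distances(graph, start).
def bfs_distances (graph : List (Int × List Int)) (start : Int) : PySem.Dict Int Int :=
  pvLoopA graph start [start] (PySem.Dict.insert PySem.Dict.empty start 0)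
    (by
      constructor
      · rw [PySem.Dict.keys_insert_of_not_contains _ _ (PySem.Dict.contains_empty start)]
        simp [PySem.Dict.keys_empty]
      · intro k hk
        rw [PySem.Dict.keys_insert_of_not_contains _ _ (PySem.Dict.contains_empty start)] at hk
        simp [PySem.Dict.keys_empty] at hk
        rw [hk]
        exact pvStart_mem_uni graph start)

def bfs_level_sizes (graph : List (Int × List Int)) (start : Int) : List Int :=
  let dist := bfs_distances graph start
  if dist.size == 0 then []
  else
    -- for node in dist: if dist[node] > max_dist: … (node is a key, so getD's default is unused)
    let maxd := dist.keys.foldl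
      (fun m node => if dist.getD node 0 > m then dist.getD node 0 else m) 0
    -- while level <= max_dist: sizes.append(0) (the level counter is the range 0..max_dist)
    let sizes := (PySem.List.pyRange 0 (maxd + 1) 1).foldl (fun s _ => s ++ [(0 : Int)]) []
    -- for node in dist: sizes[d2] += 1 (d2 is always in range, so the total set/get forms are exact)
    dist.keys.foldl
      (fun s node =>
        PySem.List.pySetD s (dist.getD node 0) (PySem.List.pyGetD s (dist.getD node 0) 0 + 1))
      sizes

-- ===== PORT B =====
-- Source B's 'while frontier:' loop, fuel-bounded (the fuel is only a totality device: one
-- unit per BFS layer; |all neighbour occurrences| + 2 layers can never be exhausted,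
-- proved below).  Each step scans the frontier, growing (visited, next-frontier) by the
-- inner 'for nb in graph.get(node, [])' fold, and prepends len(frontier) to the sizes.
def pvLoopBFuel (graph : List (Int × List Int)) : Nat → PySem.Set Int → List Int → List Int
  | 0, _, _ => []
  | _ + 1, _, [] => []
  | fuel + 1, visited, f0 :: fr =>
      PySem.List.len (f0 :: fr) ::
        pvLoopBFuel graph fuel
          ((f0 :: fr).foldl (fun s node =>
              (PySem.Dict.getD (PySem.Dict.mk graph) node []).foldl
                (fun t nb => if PySem.Set.contains t.1 nb then t
                             else (PySem.Set.add t.1 nb, t.2 ++ [nb])) s)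
            (visited, [])).1
          ((f0 :: fr).foldl (fun s node =>
              (PySem.Dict.getD (PySem.Dict.mk graph) node []).foldl
                (fun t nb => if PySem.Set.contains t.1 nb then t
                             else (PySem.Set.add t.1 nb, t.2 ++ [nb])) s)
            (visited, [])).2

def bfs_level_sizes_alt (graph : List (Int × List Int)) (start : Int) : List Int :=
  pvLoopBFuel graph ((graph.flatMap (fun p => p.2)).length + 2)
    (PySem.Set.ofList [start]) [start]

-- ===== PRECONDITION & SPEC =====
def Spec_bfs_level_sizes (graph : List (Int × List Int)) (start : Int) (out : List Int) : Prop := out = bfs_level_sizes_alt graph start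
instance (graph : List (Int × List Int)) (start : Int) (out : List Int) : Decidable (Spec_bfs_level_sizes graph start out) := by unfold Spec_bfs_level_sizes; infer_instance

-- ===== CLAIM (what is proved, stated in full; the proofs are below) =====
def Claim_equal_bfs_level_sizes : Prop := ∀ (graph : List (Int × List Int)) (start : Int), Dom_bfs_level_sizes graph start → Spec_bfs_level_sizes graph start (bfs_level_sizes graph start)

-- ===== LEMMAS AND PROOFS =====

-- Proof-only re-description of B's loop: visited as an invariant-carrying set, with the
-- fold split into named steps, so that the simulation against A can be stated per level.
def pvInvB (graph : List (Int × List Int)) (start : Int) (v : PySem.Set Int) : Prop :=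
  v.Nodup ∧ ∀ x ∈ v, x ∈ pvUni graph start

def pvStepInnerB (s : PySem.Set Int × List Int) (nb : Int) : PySem.Set Int × List Int :=
  if PySem.Set.contains s.1 nb then s
  else (PySem.Set.add s.1 nb, s.2 ++ [nb])

def pvStepNodeB (graph : List (Int × List Int)) (s : PySem.Set Int × List Int) (node : Int) :
    PySem.Set Int × List Int :=
  match pvGraphGet graph node with
  | none => s
  | some neighbors => neighbors.foldl pvStepInnerB s

-- the inline per-node fold of pvLoopBFuel is pvStepNodeB
lemma pvFuelStep_eq (graph : List (Int × List Int)) :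
    (fun (s : PySem.Set Int × List Int) (node : Int) =>
        (PySem.Dict.getD (PySem.Dict.mk graph) node []).foldl
          (fun t nb => if PySem.Set.contains t.1 nb then t
                       else (PySem.Set.add t.1 nb, t.2 ++ [nb])) s) =
      pvStepNodeB graph := by
  funext s node
  show (PySem.Dict.getD (PySem.Dict.mk graph) node []).foldl pvStepInnerB s =
    pvStepNodeB graph s node
  unfold pvStepNodeB pvGraphGet
  rw [PySem.Dict.getD_eq_get?_getD]
  cases PySem.Dict.get? (PySem.Dict.mk graph) node with
  | none => rfl
  | some nbs => rfl

lemma pvFoldB_weak (l : List Int) :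
    ∀ (v : PySem.Set Int) (acc : List Int), v.Nodup →
    ∃ Δ : List Int,
      l.foldl pvStepInnerB (v, acc) = (v ++ Δ, acc ++ Δ) ∧ (v ++ Δ).Nodup ∧
      (∀ x ∈ Δ, x ∈ l ∧ x ∉ v) := by
  induction l with
  | nil => intro v acc hv; exact ⟨[], by simp, by simpa using hv, by simp⟩
  | cons nb t ih =>
    intro v acc hv
    simp only [List.foldl_cons]
    by_cases hc : PySem.Set.contains v nb = true
    · have hmem : nb ∈ v := (PySem.Set.contains_iff v nb).mp hc
      have hstep : pvStepInnerB (v, acc) nb = (v, acc) := by simp [pvStepInnerB, hmem]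
      rw [hstep]
      obtain ⟨Δ, h1, h2, h3⟩ := ih v acc hv
      exact ⟨Δ, h1, h2, fun x hx => ⟨List.mem_cons_of_mem _ (h3 x hx).1, (h3 x hx).2⟩⟩
    · have hnb : nb ∉ v := fun hmem => hc ((PySem.Set.contains_iff v nb).mpr hmem)
      have hstep : pvStepInnerB (v, acc) nb = (v ++ [nb], acc ++ [nb]) := by
        simp [pvStepInnerB, hnb]
      rw [hstep]
      have hv' : (v ++ [nb]).Nodup :=
        List.Nodup.append hv (List.nodup_singleton nb)
          (fun a ha hb => hnb (by simp at hb; rwa [hb] at ha))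
      obtain ⟨Δ, h1, h2, h3⟩ := ih (v ++ [nb]) (acc ++ [nb]) hv'
      refine ⟨nb :: Δ, by rw [h1]; simp, by simpa using h2, ?_⟩
      intro x hx
      rcases List.mem_cons.mp hx with h | h
      · subst h; exact ⟨List.mem_cons_self, hnb⟩
      · have h4 := h3 x h
        exact ⟨List.mem_cons_of_mem _ h4.1, fun hk => h4.2 (by simp [hk])⟩

lemma pvFrontB_weak (graph : List (Int × List Int)) (start : Int) (F : List Int) :
    ∀ (v : PySem.Set Int) (acc : List Int), pvInvB graph start v →
    ∃ Δ : List Int,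
      F.foldl (pvStepNodeB graph) (v, acc) = (v ++ Δ, acc ++ Δ) ∧ pvInvB graph start (v ++ Δ) := by
  induction F with
  | nil => intro v acc hv; exact ⟨[], by simp, by simpa using hv⟩
  | cons n0 F' ih =>
    intro v acc hv
    simp only [List.foldl_cons]
    cases hG : pvGraphGet graph n0 with
    | none =>
      have hstep : pvStepNodeB graph (v, acc) n0 = (v, acc) := by simp [pvStepNodeB, hG]
      rw [hstep]
      exact ih v acc hv
    | some nbs =>
      have hstep : pvStepNodeB graph (v, acc) n0 = nbs.foldl pvStepInnerB (v, acc) := by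
        simp [pvStepNodeB, hG]
      rw [hstep]
      obtain ⟨Δ0, h1, h2, h3⟩ := pvFoldB_weak nbs v acc hv.1
      rw [h1]
      have hv0 : pvInvB graph start (v ++ Δ0) := by
        refine ⟨h2, ?_⟩
        intro x hx
        rcases List.mem_append.mp hx with hx | hx
        · exact hv.2 x hx
        · exact pvGraphGet_sub graph start n0 hG x (h3 x hx).1
      obtain ⟨Δ1, h4, h5⟩ := ih (v ++ Δ0) (acc ++ Δ0) hv0
      exact ⟨Δ0 ++ Δ1, by rw [h4]; simp, by simpa using h5⟩

lemma pvInvB_size_le (graph : List (Int × List Int)) (start : Int) (v : PySem.Set Int)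
    (h : pvInvB graph start v) : v.length ≤ (pvUni graph start).length :=
  (List.subperm_of_subset h.1 (fun x hx => h.2 x hx)).length_le

def pvLoopB (graph : List (Int × List Int)) (start : Int) (frontier : List Int)
    (visited : PySem.Set Int) (h : pvInvB graph start visited) : List Int :=
  match frontier with
  | [] => []
  | f0 :: fr =>
      PySem.List.len (f0 :: fr) ::
        pvLoopB graph start ((f0 :: fr).foldl (pvStepNodeB graph) (visited, [])).2
          ((f0 :: fr).foldl (pvStepNodeB graph) (visited, [])).1
          (by
            obtain ⟨Δ, hEq, hInv⟩ := pvFrontB_weak graph start (f0 :: fr) visited [] h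
            rw [hEq]
            exact hInv)
termination_by 2 * ((pvUni graph start).length + 1 - visited.length) + frontier.length
decreasing_by
  obtain ⟨Δ, hEq, hInv⟩ := pvFrontB_weak graph start (f0 :: fr) visited [] h
  have h1 := pvInvB_size_le graph start _ hInv
  have h2 := pvInvB_size_le graph start _ h
  rw [hEq]
  have hΔ : (visited ++ Δ).length = visited.length + Δ.length := by simp
  simp only [List.length_append, List.length_cons, List.nil_append]
  omega

-- proof-irrelevant congruence for the loops
lemma pvLoopA_congr (graph : List (Int × List Int)) (start : Int) {P P' : List Int}
    {D D' : PySem.Dict Int Int} (hP : P = P') (hD : D = D') (h : pvInvA graph start D)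
    (h' : pvInvA graph start D') : pvLoopA graph start P D h = pvLoopA graph start P' D' h' := by
  subst hP; subst hD; rfl

lemma pvLoopB_congr (graph : List (Int × List Int)) (start : Int) {F F' : List Int}
    {v v' : PySem.Set Int} (hF : F = F') (hv : v = v') (h : pvInvB graph start v)
    (h' : pvInvB graph start v') : pvLoopB graph start F v h = pvLoopB graph start F' v' h' := by
  subst hF; subst hv; rfl

lemma pvLoopB_nil (graph : List (Int × List Int)) (start : Int) (v : PySem.Set Int)
    (h : pvInvB graph start v) : pvLoopB graph start [] v h = [] := by
  rw [pvLoopB]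

lemma pvLoopB_cons (graph : List (Int × List Int)) (start f0 : Int) (fr : List Int)
    (v : PySem.Set Int) (h : pvInvB graph start v) :
    pvLoopB graph start (f0 :: fr) v h =
      PySem.List.len (f0 :: fr) ::
        pvLoopB graph start ((f0 :: fr).foldl (pvStepNodeB graph) (v, [])).2
          ((f0 :: fr).foldl (pvStepNodeB graph) (v, [])).1
          (by
            obtain ⟨Δ, hEq, hInv⟩ := pvFrontB_weak graph start (f0 :: fr) v [] h
            rw [hEq]
            exact hInv) := by
  rw [pvLoopB]

-- the fuel-bounded port equals the invariant-carrying loop whenever the fuel dominates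
-- the number of remaining layers (each non-final layer adds a visited node)
lemma pvLoopBFuel_eq (graph : List (Int × List Int)) (start : Int) :
    ∀ (n : Nat) (F : List Int) (v : PySem.Set Int) (h : pvInvB graph start v),
      (pvUni graph start).length + 2 - v.length ≤ n →
      pvLoopBFuel graph n v F = pvLoopB graph start F v h := by
  intro n
  induction n with
  | zero =>
    intro F v h hn
    have := pvInvB_size_le graph start v h
    omega
  | succ m ih =>
    intro F v h hn
    cases F with
    | nil => rw [pvLoopBFuel, pvLoopB_nil]
    | cons f0 fr =>
      rw [pvLoopBFuel, pvLoopB_cons]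
      rw [pvFuelStep_eq graph]
      obtain ⟨Δ, hEq, hInv⟩ := pvFrontB_weak graph start (f0 :: fr) v [] h
      refine congrArg _ ?_
      have hX1 : ((f0 :: fr).foldl (pvStepNodeB graph) (v, [])).1 = v ++ Δ := by rw [hEq]
      have hX2 : ((f0 :: fr).foldl (pvStepNodeB graph) (v, [])).2 = Δ := by rw [hEq]; simp
      rw [pvLoopB_congr graph start hX2 hX1 _ hInv]
      conv_lhs => rw [hX1, hX2]
      by_cases hΔ : Δ = []
      · subst hΔ
        rw [pvLoopB_nil]
        cases m with
        | zero => rfl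
        | succ m' => rw [pvLoopBFuel]
      · have hpos : 0 < Δ.length := List.length_pos_iff.mpr hΔ
        have hle := pvInvB_size_le graph start _ hInv
        have hbound : (pvUni graph start).length + 2 - (v ++ Δ).length ≤ m := by
          rw [List.length_append] at hle ⊢
          omega
        exact ih Δ (v ++ Δ) hInv hbound

-- first-match lookup in a concatenated association list
lemma pvGet?_mk_append (l1 l2 : List (Int × Int)) (x : Int) :
    (PySem.Dict.mk (l1 ++ l2)).get? x =
      ((PySem.Dict.mk l1).get? x).or ((PySem.Dict.mk l2).get? x) := by
  induction l1 with
  | nil =>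
    have h0 : (PySem.Dict.mk ([] : List (Int × Int))) = PySem.Dict.empty := rfl
    simp [h0, PySem.Dict.get?_empty]
  | cons p t ih =>
    obtain ⟨k, v⟩ := p
    rw [List.cons_append, PySem.Dict.get?_mk_cons, PySem.Dict.get?_mk_cons]
    by_cases hk : (k == x) = true
    · simp [hk]
    · rw [if_neg hk, if_neg hk]
      exact ih

lemma pvGet?_mk_map_const {N : List Int} {x : Int} (hx : x ∈ N) (w : Int) :
    (PySem.Dict.mk (N.map (fun y => (y, w)))).get? x = some w := by
  induction N with
  | nil => cases hx
  | cons y t ih =>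
    rw [List.map_cons, PySem.Dict.get?_mk_cons]
    by_cases hk : (y == x) = true
    · simp [hk]
    · rw [if_neg hk]
      rcases List.mem_cons.mp hx with h | h
      · exact absurd (by simp [h]) hk
      · exact ih h

-- the list of NEW nodes a scan of a neighbour list discovers, given the membership
-- test 'c' that holds before the scan (both ports' inner loops produce exactly this)
def pvNewOf (c : Int → Bool) : List Int → List Int
  | [] => []
  | nb :: t => if c nb then pvNewOf c t else nb :: pvNewOf (fun x => x == nb || c x) t

lemma pvNewOf_congr {c c' : Int → Bool} (h : ∀ x, c x = c' x) :
    ∀ l : List Int, pvNewOf c l = pvNewOf c' l := by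
  intro l
  induction l generalizing c c' with
  | nil => rfl
  | cons nb t ih =>
    simp only [pvNewOf, h nb]
    by_cases hc : c' nb = true
    · simp [hc, ih h]
    · rw [if_neg hc, if_neg hc]
      exact congrArg (nb :: ·)
        (ih (c := fun x => x == nb || c x) (c' := fun x => x == nb || c' x)
          (fun x => by show (x == nb || c x) = (x == nb || c' x); rw [h x]))

lemma pvNewOf_mem {c : Int → Bool} {l : List Int} {x : Int} (hx : x ∈ pvNewOf c l) :
    x ∈ l ∧ c x = false := by
  induction l generalizing c with
  | nil => cases hx
  | cons nb t ih =>
    simp only [pvNewOf] at hx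
    by_cases hc : c nb = true
    · rw [if_pos hc] at hx
      exact ⟨List.mem_cons_of_mem _ (ih hx).1, (ih hx).2⟩
    · rw [if_neg hc] at hx
      rcases List.mem_cons.mp hx with h | h
      · subst h
        exact ⟨List.mem_cons_self, by simpa using hc⟩
      · have h2 := ih h
        have h3 : (x == nb || c x) = false := h2.2
        simp only [Bool.or_eq_false_iff] at h3
        exact ⟨List.mem_cons_of_mem _ h2.1, h3.2⟩

lemma pvNewOf_nodup (c : Int → Bool) (l : List Int) : (pvNewOf c l).Nodup := by
  induction l generalizing c with
  | nil => exact List.nodup_nil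
  | cons nb t ih =>
    simp only [pvNewOf]
    by_cases hc : c nb = true
    · simp [hc, ih]
    · rw [if_neg hc]
      rw [List.nodup_cons]
      refine ⟨?_, ih _⟩
      intro hmem
      have := (pvNewOf_mem hmem).2
      simp at this

-- A's inner loop, exactly: it inserts the new nodes of the neighbour list at value ℓ+1
-- (ℓ the value of the scanned node) and appends them to the queue.
lemma pvFoldA_eq (node ℓ : Int) (l : List Int) :
    ∀ (d : PySem.Dict Int Int) (acc : List Int), d.keys.Nodup → d.get? node = some ℓ →
    l.foldl (pvStepA node) (d, acc) =
      (PySem.Dict.mk (d.items ++ (pvNewOf (fun x => d.contains x) l).map (fun x => (x, ℓ + 1))),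
       acc ++ pvNewOf (fun x => d.contains x) l) := by
  induction l with
  | nil => intro d acc _ _; simp [pvNewOf]
  | cons nb t ih =>
    intro d acc hk hn
    simp only [List.foldl_cons, pvNewOf]
    by_cases hc : d.contains nb = true
    · rw [if_pos hc]
      have hstep : pvStepA node (d, acc) nb = (d, acc) := by simp [pvStepA, hc]
      rw [hstep]
      exact ih d acc hk hn
    · have hc' : d.contains nb = false := by simpa using hc
      have hnb : nb ∉ d.keys := fun hm => hc ((PySem.Dict.contains_iff_mem_keys d nb).mpr hm)
      have hdg : d.getD node 0 = ℓ := by rw [PySem.Dict.getD_eq_get?_getD, hn]; rfl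
      have hstep : pvStepA node (d, acc) nb = (d.insert nb (ℓ + 1), acc ++ [nb]) := by
        simp [pvStepA, hc', hdg]
      rw [hstep, if_neg hc]
      have hnode_mem : node ∈ d.keys := by
        by_contra hcon
        rw [(PySem.Dict.get?_eq_none_iff_not_mem_keys d node).mpr hcon] at hn
        cases hn
      have hnode : node ≠ nb := by rintro rfl; exact hnb hnode_mem
      have hk' : (d.insert nb (ℓ + 1)).keys.Nodup := by
        rw [PySem.Dict.keys_insert_of_not_contains d _ hc']
        exact List.Nodup.append hk (List.nodup_singleton nb)
          (fun a ha hb => hnb (by simp at hb; rwa [hb] at ha))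
      have hn' : (d.insert nb (ℓ + 1)).get? node = some ℓ := by
        rw [PySem.Dict.get?_insert_of_ne d _ hnode]; exact hn
      rw [ih (d.insert nb (ℓ + 1)) (acc ++ [nb]) hk' hn']
      have hcong : pvNewOf (fun x => (d.insert nb (ℓ + 1)).contains x) t =
          pvNewOf (fun x => x == nb || d.contains x) t :=
        pvNewOf_congr (fun x => by
          show (d.insert nb (ℓ + 1)).contains x = (x == nb || d.contains x)
          exact PySem.Dict.contains_insert d nb x (ℓ + 1)) t
      rw [hcong, PySem.Dict.items_insert_of_not_contains d _ hc']
      simp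

-- one outer iteration of A, in closed form
lemma pvExpandA_eq (graph : List (Int × List Int)) (d : PySem.Dict Int Int) (node ℓ : Int)
    (hk : d.keys.Nodup) (hn : d.get? node = some ℓ) :
    pvExpandA graph d node =
      (PySem.Dict.mk (d.items ++
         (pvNewOf (fun x => d.contains x) ((pvGraphGet graph node).getD [])).map
           (fun x => (x, ℓ + 1))),
       pvNewOf (fun x => d.contains x) ((pvGraphGet graph node).getD [])) := by
  unfold pvExpandA
  cases hG : pvGraphGet graph node with
  | none => simp [pvNewOf]
  | some nbs => simpa using pvFoldA_eq node ℓ nbs d [] hk hn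

-- B's inner loop, exactly: it adds the same new nodes to the visited set and the next frontier.
lemma pvFoldB_eq (l : List Int) :
    ∀ (v : PySem.Set Int) (acc : List Int),
    l.foldl pvStepInnerB (v, acc) =
      (v ++ pvNewOf (fun x => PySem.Set.contains v x) l,
       acc ++ pvNewOf (fun x => PySem.Set.contains v x) l) := by
  induction l with
  | nil => intro v acc; simp [pvNewOf]
  | cons nb t ih =>
    intro v acc
    simp only [List.foldl_cons, pvNewOf]
    by_cases hc : PySem.Set.contains v nb = true
    · rw [if_pos hc]
      have hmem : nb ∈ v := (PySem.Set.contains_iff v nb).mp hc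
      have hstep : pvStepInnerB (v, acc) nb = (v, acc) := by simp [pvStepInnerB, hmem]
      rw [hstep]
      exact ih v acc
    · have hnb : nb ∉ v := fun hm => hc ((PySem.Set.contains_iff v nb).mpr hm)
      have hstep : pvStepInnerB (v, acc) nb = (v ++ [nb], acc ++ [nb]) := by
        simp [pvStepInnerB, hnb]
      rw [hstep, if_neg hc, ih (v ++ [nb]) (acc ++ [nb])]
      have hcong : pvNewOf (fun x => PySem.Set.contains (v ++ [nb]) x) t =
          pvNewOf (fun x => x == nb || PySem.Set.contains v x) t :=
        pvNewOf_congr (fun x => by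
          show PySem.Set.contains (v ++ [nb]) x = (x == nb || PySem.Set.contains v x)
          simp only [PySem.Set.contains_eq_listContains, List.contains_append]
          cases hx : List.contains v x
          · simp only [Bool.or_false, Bool.false_or]
            by_cases hxe : x = nb <;> simp [hxe, List.contains_eq_mem]
          · simp) t
      rw [hcong]
      simp

-- one node of B's frontier loop, in closed form
lemma pvStepNodeB_eq (graph : List (Int × List Int)) (v : PySem.Set Int) (acc : List Int)
    (node : Int) :
    pvStepNodeB graph (v, acc) node =
      (v ++ pvNewOf (fun x => PySem.Set.contains v x) ((pvGraphGet graph node).getD []),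
       acc ++ pvNewOf (fun x => PySem.Set.contains v x) ((pvGraphGet graph node).getD [])) := by
  unfold pvStepNodeB
  cases hG : pvGraphGet graph node with
  | none => simp [pvNewOf]
  | some nbs => simpa using pvFoldB_eq nbs v acc

-- unfolding equations of A's loop
lemma pvLoopA_nil (graph : List (Int × List Int)) (start : Int) (d : PySem.Dict Int Int)
    (h : pvInvA graph start d) : pvLoopA graph start [] d h = d := by
  rw [pvLoopA]

lemma pvLoopA_cons (graph : List (Int × List Int)) (start node : Int) (rest : List Int)
    (d : PySem.Dict Int Int) (h : pvInvA graph start d) :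
    pvLoopA graph start (node :: rest) d h =
      pvLoopA graph start (rest ++ (pvExpandA graph d node).2) (pvExpandA graph d node).1
        ((pvExpandA_spec graph start node d h).1) := by
  rw [pvLoopA]

-- contains over concatenated / map-constant association lists
lemma pvContains_mk_append (l1 l2 : List (Int × Int)) (x : Int) :
    (PySem.Dict.mk (l1 ++ l2)).contains x =
      ((PySem.Dict.mk l1).contains x || (PySem.Dict.mk l2).contains x) := by
  simp only [PySem.Dict.contains_eq_isSome_get?, pvGet?_mk_append]
  cases (PySem.Dict.mk l1).get? x <;> simp [Option.or]

lemma pvContains_mk_map_const (N : List Int) (w x : Int) :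
    (PySem.Dict.mk (N.map (fun y => (y, w)))).contains x = N.contains x := by
  induction N with
  | nil =>
    have h0 : (PySem.Dict.mk ([] : List (Int × Int))) = PySem.Dict.empty := rfl
    simp [h0, PySem.Dict.contains_empty]
  | cons y t ih =>
    rw [List.map_cons]
    simp only [PySem.Dict.contains_eq_isSome_get?, PySem.Dict.get?_mk_cons] at *
    by_cases hk : (y == x) = true
    · rw [if_pos hk]
      simp only [beq_iff_eq] at hk
      subst hk
      simp
    · rw [if_neg hk]
      rw [List.contains_cons]
      have : (x == y) = false := by
        by_contra hxy
        simp only [Bool.not_eq_false, beq_iff_eq] at hxy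
        exact hk (by simp [hxy])
      rw [this, Bool.false_or]
      exact ih

-- all new nodes a whole frontier discovers, given the membership test before the level
def pvNewsAll (graph : List (Int × List Int)) (c : Int → Bool) : List Int → List Int
  | [] => []
  | n :: rest =>
      pvNewOf c ((pvGraphGet graph n).getD []) ++
        pvNewsAll graph
          (fun x => c x || (pvNewOf c ((pvGraphGet graph n).getD [])).contains x) rest

lemma pvNewsAll_congr (graph : List (Int × List Int)) {c c' : Int → Bool}
    (h : ∀ x, c x = c' x) : ∀ F, pvNewsAll graph c F = pvNewsAll graph c' F := by
  intro F
  induction F generalizing c c' with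
  | nil => rfl
  | cons n rest ih =>
    simp only [pvNewsAll]
    rw [pvNewOf_congr h ((pvGraphGet graph n).getD [])]
    exact congrArg _ (ih (fun x =>
      congrArg (· || (pvNewOf c' ((pvGraphGet graph n).getD [])).contains x) (h x)))

lemma pvNewsAll_mem (graph : List (Int × List Int)) (start : Int) {c : Int → Bool}
    {F : List Int} {x : Int} (hx : x ∈ pvNewsAll graph c F) :
    c x = false ∧ x ∈ pvUni graph start := by
  induction F generalizing c with
  | nil => cases hx
  | cons n rest ih =>
    simp only [pvNewsAll] at hx
    rcases List.mem_append.mp hx with h | h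
    · have h1 := pvNewOf_mem h
      refine ⟨h1.2, ?_⟩
      cases hG : pvGraphGet graph n with
      | none => rw [hG] at h1; cases h1.1
      | some nbs =>
        rw [hG] at h1
        exact pvGraphGet_sub graph start n hG x h1.1
    · have h1 := ih h
      have h2 : (c x || _) = false := h1.1
      simp only [Bool.or_eq_false_iff] at h2
      exact ⟨h2.1, h1.2⟩

lemma pvNewsAll_nodup (graph : List (Int × List Int)) (c : Int → Bool) :
    ∀ F, (pvNewsAll graph c F).Nodup := by
  intro F
  induction F generalizing c with
  | nil => exact List.nodup_nil
  | cons n rest ih =>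
    simp only [pvNewsAll]
    refine List.Nodup.append (pvNewOf_nodup _ _) (ih _) ?_
    intro a ha hb
    have h1 := (pvNewsAll_mem graph 0 hb).1
    simp only [Bool.or_eq_false_iff] at h1
    rw [List.contains_eq_mem] at h1
    exact absurd ha (by simpa using h1.2)

-- B's whole frontier scan, in closed form
lemma pvFrontB_eq (graph : List (Int × List Int)) :
    ∀ (F : List Int) (v : PySem.Set Int) (acc : List Int),
    F.foldl (pvStepNodeB graph) (v, acc) =
      (v ++ pvNewsAll graph (fun x => PySem.Set.contains v x) F,
       acc ++ pvNewsAll graph (fun x => PySem.Set.contains v x) F) := by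
  intro F
  induction F with
  | nil => intro v acc; simp [pvNewsAll]
  | cons n0 F' ih =>
    intro v acc
    simp only [List.foldl_cons]
    rw [pvStepNodeB_eq graph v acc n0]
    rw [ih (v ++ pvNewOf (fun x => PySem.Set.contains v x) ((pvGraphGet graph n0).getD []))
        (acc ++ pvNewOf (fun x => PySem.Set.contains v x) ((pvGraphGet graph n0).getD []))]
    have hcong :
        pvNewsAll graph
          (fun x => PySem.Set.contains
            (v ++ pvNewOf (fun y => PySem.Set.contains v y) ((pvGraphGet graph n0).getD [])) x) F' =
        pvNewsAll graph
          (fun x => PySem.Set.contains v x ||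
            (pvNewOf (fun y => PySem.Set.contains v y) ((pvGraphGet graph n0).getD [])).contains x)
          F' := by
      refine pvNewsAll_congr graph (fun x => ?_) F'
      show PySem.Set.contains _ x = _
      simp only [PySem.Set.contains_eq_listContains, List.contains_append]
    rw [hcong]
    simp [pvNewsAll]

lemma pvGet?_append_left {d : PySem.Dict Int Int} {E : List (Int × Int)} {x w : Int}
    (h : d.get? x = some w) : (PySem.Dict.mk (d.items ++ E)).get? x = some w := by
  rw [pvGet?_mk_append]
  have hd : (PySem.Dict.mk d.items).get? x = d.get? x := rfl
  rw [hd, h]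
  rfl

lemma pvGet?_ext_fresh {d : PySem.Dict Int Int} {N : List Int} {x : Int} (w : Int)
    (hx : x ∈ N) (hc : d.contains x = false) :
    (PySem.Dict.mk (d.items ++ N.map (fun y => (y, w)))).get? x = some w := by
  rw [pvGet?_mk_append]
  have hnone : d.get? x = none := by
    rw [PySem.Dict.contains_eq_isSome_get?] at hc
    exact Option.not_isSome_iff_eq_none.mp (by simp [hc])
  have hd : (PySem.Dict.mk d.items).get? x = d.get? x := rfl
  rw [hd, hnone, pvGet?_mk_map_const hx w]
  rfl

lemma pvContains_ext (d : PySem.Dict Int Int) (N : List Int) (w x : Int) :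
    (PySem.Dict.mk (d.items ++ N.map (fun y => (y, w)))).contains x =
      (d.contains x || N.contains x) := by
  rw [pvContains_mk_append]
  have hd : (PySem.Dict.mk d.items).contains x = d.contains x := rfl
  rw [hd, pvContains_mk_map_const]

-- processing a whole frontier prefix of A's queue at once
lemma pvLoopA_collapse (graph : List (Int × List Int)) (start ℓ : Int) :
    ∀ (F q : List Int) (d : PySem.Dict Int Int) (h : pvInvA graph start d)
      (_hF : ∀ x ∈ F, d.get? x = some ℓ)
      (h' : pvInvA graph start (PySem.Dict.mk (d.items ++
        (pvNewsAll graph (fun x => d.contains x) F).map (fun x => (x, ℓ + 1))))),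
    pvLoopA graph start (F ++ q) d h =
      pvLoopA graph start (q ++ pvNewsAll graph (fun x => d.contains x) F)
        (PySem.Dict.mk (d.items ++
          (pvNewsAll graph (fun x => d.contains x) F).map (fun x => (x, ℓ + 1)))) h' := by
  intro F
  induction F with
  | nil =>
    intro q d h _hF h'
    exact pvLoopA_congr graph start (by simp [pvNewsAll]) (by simp [pvNewsAll]) h h'
  | cons n0 F' ih =>
    intro q d h hF h'
    rw [List.cons_append, pvLoopA_cons]
    have hn0 := hF n0 List.mem_cons_self
    have hE := pvExpandA_eq graph d n0 ℓ h.1 hn0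
    have h1 : (pvExpandA graph d n0).1 =
        PySem.Dict.mk (d.items ++
          (pvNewOf (fun x => d.contains x) ((pvGraphGet graph n0).getD [])).map
            (fun x => (x, ℓ + 1))) := by rw [hE]
    have h2 : (pvExpandA graph d n0).2 =
        pvNewOf (fun x => d.contains x) ((pvGraphGet graph n0).getD []) := by rw [hE]
    have hInv1 : pvInvA graph start
        (PySem.Dict.mk (d.items ++
          (pvNewOf (fun x => d.contains x) ((pvGraphGet graph n0).getD [])).map
            (fun x => (x, ℓ + 1)))) := h1 ▸ (pvExpandA_spec graph start n0 d h).1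
    rw [pvLoopA_congr graph start (by rw [h2, List.append_assoc]) h1 _ hInv1]
    have hcontains : ∀ x,
        (PySem.Dict.mk (d.items ++
          (pvNewOf (fun y => d.contains y) ((pvGraphGet graph n0).getD [])).map
            (fun y => (y, ℓ + 1)))).contains x =
        (d.contains x ||
          (pvNewOf (fun y => d.contains y) ((pvGraphGet graph n0).getD [])).contains x) :=
      fun x => pvContains_ext d _ (ℓ + 1) x
    have hnews :
        pvNewsAll graph (fun x =>
          (PySem.Dict.mk (d.items ++
            (pvNewOf (fun y => d.contains y) ((pvGraphGet graph n0).getD [])).map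
              (fun y => (y, ℓ + 1)))).contains x) F' =
        pvNewsAll graph (fun x => d.contains x ||
          (pvNewOf (fun y => d.contains y) ((pvGraphGet graph n0).getD [])).contains x) F' :=
      pvNewsAll_congr graph hcontains F'
    have hd_eq :
        PySem.Dict.mk ((PySem.Dict.mk (d.items ++
            (pvNewOf (fun y => d.contains y) ((pvGraphGet graph n0).getD [])).map
              (fun y => (y, ℓ + 1)))).items ++
          (pvNewsAll graph (fun x =>
            (PySem.Dict.mk (d.items ++
              (pvNewOf (fun y => d.contains y) ((pvGraphGet graph n0).getD [])).map
                (fun y => (y, ℓ + 1)))).contains x) F').map (fun x => (x, ℓ + 1))) =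
        PySem.Dict.mk (d.items ++
          (pvNewsAll graph (fun x => d.contains x) (n0 :: F')).map (fun x => (x, ℓ + 1))) := by
      rw [hnews]
      simp [pvNewsAll, List.append_assoc]
    have hF' : ∀ x ∈ F',
        (PySem.Dict.mk (d.items ++
          (pvNewOf (fun y => d.contains y) ((pvGraphGet graph n0).getD [])).map
            (fun y => (y, ℓ + 1)))).get? x = some ℓ :=
      fun x hx => pvGet?_append_left (hF x (List.mem_cons_of_mem _ hx))
    rw [ih (q ++ pvNewOf (fun x => d.contains x) ((pvGraphGet graph n0).getD [])) _ hInv1 hF'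
        (hd_eq ▸ h')]
    refine pvLoopA_congr graph start ?_ hd_eq _ h'
    rw [hnews]
    simp [pvNewsAll, List.append_assoc]

lemma pvLoopB_shape (graph : List (Int × List Int)) (start : Int) (F : List Int)
    (v : PySem.Set Int) (hv : pvInvB graph start v) (hF : F ≠ []) :
    ∃ t, pvLoopB graph start F v hv = ((F.length : Int)) :: t := by
  cases F with
  | nil => exact absurd rfl hF
  | cons f0 fr => exact ⟨_, by rw [pvLoopB_cons, PySem.List.len_eq]⟩

lemma pvKeys_ext (d : PySem.Dict Int Int) (N : List Int) (w : Int) :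
    (PySem.Dict.mk (d.items ++ N.map (fun y => (y, w)))).keys = d.keys ++ N := by
  simp [PySem.Dict.keys, Function.comp_def]

-- the simulation invariant: A's remaining run from a frontier F (whose nodes have value ℓ)
-- appends entries E whose value-counts are B's remaining level sizes
lemma pvMain (graph : List (Int × List Int)) (start : Int) :
    ∀ (n : Nat) (F : List Int) (d : PySem.Dict Int Int) (v : PySem.Set Int) (ℓ : Int)
      (h : pvInvA graph start d) (hv : pvInvB graph start v),
      (pvUni graph start).length + 1 - v.length ≤ n →
      (∀ x, x ∈ d.keys ↔ x ∈ v) →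
      (∀ x ∈ F, d.get? x = some ℓ) →
      ∃ E : List (Int × Int),
        pvLoopA graph start F d h = PySem.Dict.mk (d.items ++ E) ∧
        (PySem.Dict.mk (d.items ++ E)).keys.Nodup ∧
        (∀ k : Nat, ((E.map Prod.snd).count (ℓ + 1 + (k : Int)) : Int) =
          (pvLoopB graph start F v hv).tail.getD k 0) ∧
        (∀ j : Int, j ≤ ℓ → (E.map Prod.snd).count j = 0) ∧
        (∀ x ∈ pvLoopB graph start F v hv, 0 < x) := by
  intro n
  induction n using Nat.strong_induction_on with
  | _ n IH =>
    intro F d v ℓ h hv hn hsync hF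
    cases F with
    | nil =>
      refine ⟨[], ?_, ?_, ?_, ?_, ?_⟩
      · rw [pvLoopA_nil]; simp
      · simpa using h.1
      · intro k; rw [pvLoopB_nil]; simp
      · intro j _; simp
      · intro x hx; rw [pvLoopB_nil] at hx; cases hx
    | cons f0 fr =>
      -- the new nodes this level discovers, seen from A's dict and from B's visited set
      have hcontains_sync : ∀ x, d.contains x = PySem.Set.contains v x := by
        intro x
        rw [PySem.Dict.contains_eq_decide_mem_keys, PySem.Set.contains_eq_listContains,
          List.contains_eq_mem]
        exact decide_eq_decide.mpr (hsync x)
      have hNN : pvNewsAll graph (fun x => PySem.Set.contains v x) (f0 :: fr) =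
          pvNewsAll graph (fun x => d.contains x) (f0 :: fr) :=
        pvNewsAll_congr graph (fun x => (hcontains_sync x).symm) _
      have hNfresh : ∀ x ∈ pvNewsAll graph (fun x => d.contains x) (f0 :: fr),
          d.contains x = false ∧ x ∈ pvUni graph start :=
        fun x hx => pvNewsAll_mem graph start hx
      have hNnodup := pvNewsAll_nodup graph (fun x => d.contains x) (f0 :: fr)
      have hNnotkeys : ∀ x ∈ pvNewsAll graph (fun x => d.contains x) (f0 :: fr),
          x ∉ d.keys := by
        intro x hx hmem
        have := (hNfresh x hx).1
        rw [(PySem.Dict.contains_iff_mem_keys d x).mpr hmem] at this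
        cases this
      have hNnotv : ∀ x ∈ pvNewsAll graph (fun x => d.contains x) (f0 :: fr), x ∉ v :=
        fun x hx hmem => hNnotkeys x hx ((hsync x).mpr hmem)
      have hkeys1 := pvKeys_ext d (pvNewsAll graph (fun x => d.contains x) (f0 :: fr)) (ℓ + 1)
      have hInv1 : pvInvA graph start
          (PySem.Dict.mk (d.items ++
            (pvNewsAll graph (fun x => d.contains x) (f0 :: fr)).map (fun x => (x, ℓ + 1)))) := by
        constructor
        · rw [hkeys1]
          exact List.Nodup.append h.1 hNnodup (fun {a} ha hb => hNnotkeys a hb ha)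
        · intro k hk
          rw [hkeys1] at hk
          rcases List.mem_append.mp hk with hk | hk
          · exact h.2 k hk
          · exact (hNfresh k hk).2
      have hv1 : pvInvB graph start
          (v ++ pvNewsAll graph (fun x => d.contains x) (f0 :: fr)) := by
        constructor
        · exact List.Nodup.append hv.1 hNnodup (fun {a} ha hb => hNnotv a hb ha)
        · intro x hx
          rcases List.mem_append.mp hx with hx | hx
          · exact hv.2 x hx
          · exact (hNfresh x hx).2
      -- A processes the whole level at once
      have hA1 : pvLoopA graph start (f0 :: fr) d h =
          pvLoopA graph start (pvNewsAll graph (fun x => d.contains x) (f0 :: fr))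
            (PySem.Dict.mk (d.items ++
              (pvNewsAll graph (fun x => d.contains x) (f0 :: fr)).map (fun x => (x, ℓ + 1))))
            hInv1 := by
        rw [pvLoopA_congr graph start (show f0 :: fr = (f0 :: fr) ++ [] by simp) rfl h h]
        rw [pvLoopA_collapse graph start ℓ (f0 :: fr) [] d h hF hInv1]
        exact pvLoopA_congr graph start (by simp) rfl _ _
      -- B emits the level size and recurses on the new frontier
      have hfront : (f0 :: fr).foldl (pvStepNodeB graph) (v, []) =
          (v ++ pvNewsAll graph (fun x => d.contains x) (f0 :: fr),
           pvNewsAll graph (fun x => d.contains x) (f0 :: fr)) := by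
        rw [pvFrontB_eq graph (f0 :: fr) v [], hNN, List.nil_append]
      have hB1 : pvLoopB graph start (f0 :: fr) v hv =
          PySem.List.len (f0 :: fr) ::
            pvLoopB graph start (pvNewsAll graph (fun x => d.contains x) (f0 :: fr))
              (v ++ pvNewsAll graph (fun x => d.contains x) (f0 :: fr)) hv1 := by
        rw [pvLoopB_cons]
        refine congrArg _ ?_
        refine pvLoopB_congr graph start ?_ ?_ _ _
        · rw [hfront]
        · rw [hfront]
      have hsync1 : ∀ x,
          x ∈ (PySem.Dict.mk (d.items ++
            (pvNewsAll graph (fun x => d.contains x) (f0 :: fr)).map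
              (fun x => (x, ℓ + 1)))).keys ↔
          x ∈ v ++ pvNewsAll graph (fun x => d.contains x) (f0 :: fr) := by
        intro x
        rw [hkeys1, List.mem_append, List.mem_append]
        exact or_congr_left (hsync x)
      have hF1 : ∀ x ∈ pvNewsAll graph (fun x => d.contains x) (f0 :: fr),
          (PySem.Dict.mk (d.items ++
            (pvNewsAll graph (fun x => d.contains x) (f0 :: fr)).map
              (fun x => (x, ℓ + 1)))).get? x = some (ℓ + 1) :=
        fun x hx => pvGet?_ext_fresh (ℓ + 1) hx (hNfresh x hx).1
      by_cases hN : pvNewsAll graph (fun x => d.contains x) (f0 :: fr) = []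
      · -- no new nodes: both sides stop after this level
        refine ⟨(pvNewsAll graph (fun x => d.contains x) (f0 :: fr)).map (fun x => (x, ℓ + 1)),
          ?_, ?_, ?_, ?_, ?_⟩
        · rw [hA1]
          rw [pvLoopA_congr graph start hN rfl hInv1 hInv1]
          exact pvLoopA_nil graph start _ _
        · exact hInv1.1
        · intro k
          rw [hB1]
          have : pvLoopB graph start (pvNewsAll graph (fun x => d.contains x) (f0 :: fr))
              (v ++ pvNewsAll graph (fun x => d.contains x) (f0 :: fr)) hv1 = [] := by
            rw [pvLoopB_congr graph start hN rfl hv1 hv1]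
            exact pvLoopB_nil graph start _ _
          rw [this, hN]
          simp
        · intro j _
          rw [hN]
          simp
        · intro x hx
          rw [hB1] at hx
          have : pvLoopB graph start (pvNewsAll graph (fun x => d.contains x) (f0 :: fr))
              (v ++ pvNewsAll graph (fun x => d.contains x) (f0 :: fr)) hv1 = [] := by
            rw [pvLoopB_congr graph start hN rfl hv1 hv1]
            exact pvLoopB_nil graph start _ _
          rw [this] at hx
          simp at hx
          rw [hx]
          omega
      · -- new nodes found: recurse one level deeper
        have hvlen : v.length <
            (v ++ pvNewsAll graph (fun x => d.contains x) (f0 :: fr)).length := by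
          rw [List.length_append]
          have : 0 < (pvNewsAll graph (fun x => d.contains x) (f0 :: fr)).length :=
            List.length_pos_iff.mpr hN
          omega
        have hle1 := pvInvB_size_le graph start _ hv1
        have hlt : (pvUni graph start).length + 1 -
            (v ++ pvNewsAll graph (fun x => d.contains x) (f0 :: fr)).length < n := by
          omega
        obtain ⟨E', hA', hnodup', c1', c2', c3'⟩ :=
          IH _ hlt (pvNewsAll graph (fun x => d.contains x) (f0 :: fr)) _ _ (ℓ + 1) hInv1 hv1
            (le_refl _) hsync1 hF1
        obtain ⟨t, hL⟩ := pvLoopB_shape graph start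
          (pvNewsAll graph (fun x => d.contains x) (f0 :: fr))
          (v ++ pvNewsAll graph (fun x => d.contains x) (f0 :: fr)) hv1 hN
        refine ⟨(pvNewsAll graph (fun x => d.contains x) (f0 :: fr)).map (fun x => (x, ℓ + 1)) ++ E',
          ?_, ?_, ?_, ?_, ?_⟩
        · rw [hA1, hA']
          simp [List.append_assoc]
        · have := hnodup'
          simpa [List.append_assoc] using this
        · intro k
          rw [hB1]
          simp only [List.tail_cons]
          rw [List.map_append, List.count_append]
          have hconst : ((pvNewsAll graph (fun x => d.contains x) (f0 :: fr)).map
              (fun x => (x, ℓ + 1))).map Prod.snd =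
              List.replicate (pvNewsAll graph (fun x => d.contains x) (f0 :: fr)).length
                (ℓ + 1) := by
            rw [List.map_map]
            exact List.map_const'
          rw [hconst]
          cases k with
          | zero =>
            rw [List.count_replicate]
            simp only [Nat.cast_zero, add_zero, beq_self_eq_true, if_true]
            have h0 : (E'.map Prod.snd).count (ℓ + 1) = 0 := c2' (ℓ + 1) (le_refl _)
            rw [h0, hL]
            simp
          | succ k' =>
            rw [List.count_replicate]
            have hne : ((ℓ + 1 : Int) == ℓ + 1 + ((k' + 1 : Nat) : Int)) = false := by
              rw [beq_eq_false_iff_ne]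
              push_cast
              omega
            rw [hne]
            simp only [Bool.false_eq_true, if_false, Nat.zero_add]
            have heq : (ℓ + 1 + ((k' + 1 : Nat) : Int)) = (ℓ + 1) + 1 + (k' : Int) := by
              push_cast; ring
            rw [heq]
            have hc := c1' k'
            rw [hL] at hc
            simp only [List.tail_cons] at hc
            rw [hc, hL]
            simp only [List.getD_cons_succ]
        · intro j hj
          rw [List.map_append, List.count_append]
          have hconst : ((pvNewsAll graph (fun x => d.contains x) (f0 :: fr)).map
              (fun x => (x, ℓ + 1))).map Prod.snd =
              List.replicate (pvNewsAll graph (fun x => d.contains x) (f0 :: fr)).length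
                (ℓ + 1) := by
            rw [List.map_map]
            exact List.map_const'
          rw [hconst, List.count_replicate]
          have hif : ((ℓ + 1 : Int) == j) = false := by
            rw [beq_eq_false_iff_ne]
            omega
          rw [hif]
          simp only [Bool.false_eq_true, if_false, Nat.zero_add]
          rw [c2' j (by omega)]
        · intro x hx
          rw [hB1] at hx
          rcases List.mem_cons.mp hx with hx | hx
          · rw [hx, PySem.List.len_eq]
            have hlenc : (f0 :: fr).length = fr.length + 1 := rfl
            rw [hlenc]
            push_cast
            omega
          · exact c3' x hx

-- a fold over dict keys that only uses the looked-up value is a fold over the values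
lemma pvFold_keys_values {β : Type} (d : PySem.Dict Int Int) (hk : d.keys.Nodup)
    (g : β → Int → β) (init : β) :
    d.keys.foldl (fun a k => g a (d.getD k 0)) init = d.values.foldl g init := by
  simp only [PySem.Dict.keys, PySem.Dict.values, List.foldl_map]
  refine PySem.List.foldl_congr_mem _ _ _ _ ?_
  intro acc p hp
  have hpm : (p.1, p.2) ∈ d.items := by simpa using hp
  rw [PySem.Dict.getD_of_mem_items d hpm hk 0]

lemma pvMaxFold_keys (d : PySem.Dict Int Int) (hk : d.keys.Nodup) :
    d.keys.foldl (fun m node => if d.getD node 0 > m then d.getD node 0 else m) 0 =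
      d.values.foldl (fun m x => if x > m then x else m) 0 :=
  pvFold_keys_values d hk (fun m x => if x > m then x else m) 0

lemma pvIncFold_keys (d : PySem.Dict Int Int) (hk : d.keys.Nodup) (init : List Int) :
    d.keys.foldl (fun s node =>
        PySem.List.pySetD s (d.getD node 0) (PySem.List.pyGetD s (d.getD node 0) 0 + 1)) init =
      d.values.foldl (fun s x => PySem.List.pySetD s x (PySem.List.pyGetD s x 0 + 1)) init :=
  pvFold_keys_values d hk (fun s x => PySem.List.pySetD s x (PySem.List.pyGetD s x 0 + 1)) init

-- the increment loop computes, at each in-range index, the old entry plus a count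
lemma pvIncCounts (V : List Int) : ∀ (s : List Int),
    (∀ x ∈ V, 0 ≤ x ∧ x.toNat < s.length) →
    (V.foldl (fun s x => PySem.List.pySetD s x (PySem.List.pyGetD s x 0 + 1)) s).length = s.length ∧
    ∀ k : Nat, k < s.length →
      (V.foldl (fun s x => PySem.List.pySetD s x (PySem.List.pyGetD s x 0 + 1)) s).getD k 0 =
        s.getD k 0 + (V.count (k : Int) : Int) := by
  induction V with
  | nil => intro s _; exact ⟨rfl, fun k _ => by simp⟩
  | cons x t ih =>
    intro s hdom
    obtain ⟨hx0, hxlt⟩ := hdom x List.mem_cons_self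
    have hxlt' : x < (s.length : Int) := by omega
    have hstep : PySem.List.pySetD s x (PySem.List.pyGetD s x 0 + 1) =
        s.set x.toNat (s[x.toNat]'hxlt + 1) := by
      rw [PySem.List.pyGetD_eq_getElem s 0 hx0 hxlt', PySem.List.pySetD_of_nonneg s _ hx0]
    have hlen : (s.set x.toNat (s[x.toNat]'hxlt + 1)).length = s.length := by simp
    have hdom' : ∀ y ∈ t, 0 ≤ y ∧ y.toNat < (s.set x.toNat (s[x.toNat]'hxlt + 1)).length := by
      intro y hy
      rw [hlen]
      exact hdom y (List.mem_cons_of_mem _ hy)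
    obtain ⟨ihlen, ihcnt⟩ := ih (s.set x.toNat (s[x.toNat]'hxlt + 1)) hdom'
    simp only [List.foldl_cons, hstep]
    refine ⟨by rw [ihlen, hlen], ?_⟩
    intro k hk
    rw [ihcnt k (by rw [hlen]; exact hk)]
    have hset : (s.set x.toNat (s[x.toNat]'hxlt + 1)).getD k 0 =
        if x.toNat = k then s[x.toNat]'hxlt + 1 else s.getD k 0 := by
      rw [List.getD_eq_getElem _ _ (by rw [hlen]; exact hk), List.getElem_set]
      split_ifs with hxy
      · rfl
      · rw [List.getD_eq_getElem _ _ hk]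
    rw [hset, List.count_cons]
    by_cases hxy : x.toNat = k
    · have hxk : (x == (k : Int)) = true := by
        rw [beq_iff_eq]; omega
      rw [if_pos hxy, hxk]
      rw [List.getD_eq_getElem _ _ hk]
      have hik : s[x.toNat]'hxlt = s[k]'hk := by congr 1
      rw [hik]
      simp
      ring
    · have hxk : (x == (k : Int)) = false := by
        rw [beq_eq_false_iff_ne]; omega
      rw [if_neg hxy, hxk]
      simp

theorem bfs_level_sizes_spec_aux : ∀ (graph : List (Int × List Int)) (start : Int),
    bfs_level_sizes graph start = bfs_level_sizes_alt graph start := by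
  intro graph start
  -- initial states of the two ports
  have hd0inv : pvInvA graph start (PySem.Dict.insert (PySem.Dict.empty : PySem.Dict Int Int) start 0) := by
    constructor
    · rw [PySem.Dict.keys_insert_of_not_contains _ _ (PySem.Dict.contains_empty start)]
      simp [PySem.Dict.keys_empty]
    · intro k hk
      rw [PySem.Dict.keys_insert_of_not_contains _ _ (PySem.Dict.contains_empty start)] at hk
      simp [PySem.Dict.keys_empty] at hk
      rw [hk]
      exact pvStart_mem_uni graph start
  have hv0inv : pvInvB graph start (PySem.Set.ofList [start]) := by
    constructor
    · exact PySem.Set.nodup_ofList _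
    · intro x hx
      rw [PySem.Set.mem_ofList] at hx
      simp at hx
      rw [hx]
      exact pvStart_mem_uni graph start
  have hd0items : (PySem.Dict.insert (PySem.Dict.empty : PySem.Dict Int Int) start 0).items = [(start, 0)] := by
    rw [PySem.Dict.items_insert_of_not_contains _ _ (PySem.Dict.contains_empty start)]
    rfl
  have hd0keys : (PySem.Dict.insert (PySem.Dict.empty : PySem.Dict Int Int) start 0).keys = [start] := by
    rw [PySem.Dict.keys_insert_of_not_contains _ _ (PySem.Dict.contains_empty start)]
    rfl
  have hsync0 : ∀ x, x ∈ (PySem.Dict.insert (PySem.Dict.empty : PySem.Dict Int Int) start 0).keys ↔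
      x ∈ PySem.Set.ofList [start] := by
    intro x
    rw [hd0keys, PySem.Set.mem_ofList]
  have hF0 : ∀ x ∈ [start], (PySem.Dict.insert (PySem.Dict.empty : PySem.Dict Int Int) start 0).get? x = some 0 := by
    intro x hx
    simp at hx
    rw [hx]
    exact PySem.Dict.get?_insert_self _ _ _
  obtain ⟨E, hA, hnodup, c1, c2, c3⟩ :=
    pvMain graph start ((pvUni graph start).length + 1 - (PySem.Set.ofList [start]).length)
      [start] (PySem.Dict.insert (PySem.Dict.empty : PySem.Dict Int Int) start 0) (PySem.Set.ofList [start]) 0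
      hd0inv hv0inv (le_refl _) hsync0 hF0
  -- B's fuel is always sufficient: |uni| ≤ 1 + |all neighbour occurrences|
  have halt : bfs_level_sizes_alt graph start =
      pvLoopB graph start [start] (PySem.Set.ofList [start]) hv0inv := by
    unfold bfs_level_sizes_alt
    refine pvLoopBFuel_eq graph start _ [start] _ hv0inv ?_
    have h1 : (pvUni graph start).length ≤ (start :: graph.flatMap (fun p => p.2)).length :=
      PySem.Set.length_ofList_le _
    simp only [List.length_cons] at h1
    have h2 : (PySem.Set.ofList [start] : PySem.Set Int).length = 1 := rfl
    omega
  obtain ⟨t, hL⟩ := pvLoopB_shape graph start [start] (PySem.Set.ofList [start]) hv0inv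
    (by simp)
  set L := pvLoopB graph start [start] (PySem.Set.ofList [start]) hv0inv with hLdef
  have hLlen : 1 ≤ L.length := by rw [hL]; simp
  -- A's distance dict in closed form
  have hdist : bfs_distances graph start = PySem.Dict.mk ((start, 0) :: E) := by
    unfold bfs_distances
    rw [pvLoopA_congr graph start rfl rfl _ hd0inv, hA, hd0items]
    rfl
  -- counts of the value multiset of the distance dict
  have hV : (PySem.Dict.mk ((start, 0) :: E)).values = 0 :: E.map Prod.snd := by
    simp [PySem.Dict.values]
  have hcount0 : ∀ k : Nat, (((0 :: E.map Prod.snd).count ((k : Nat) : Int) : Int)) = L.getD k 0 := by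
    intro k
    rw [List.count_cons]
    cases k with
    | zero =>
      have h0 : (E.map Prod.snd).count ((0 : Nat) : Int) = 0 := c2 0 (by simp)
      rw [h0, hL]
      simp
    | succ k' =>
      have hnz : ((0 : Int) == ((k' + 1 : Nat) : Int)) = false := by
        rw [beq_eq_false_iff_ne]
        push_cast
        omega
      rw [hnz]
      have hc := c1 k'
      rw [hL] at hc
      simp only [List.tail_cons] at hc
      have harg : ((0 : Int) + 1 + (k' : Int)) = (((k' + 1 : Nat)) : Int) := by push_cast; ring
      rw [harg] at hc
      rw [hL]
      simp only [List.getD_cons_succ]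
      rw [← hc]
      simp
  have hcneg : ∀ j : Int, j < 0 → (0 :: E.map Prod.snd).count j = 0 := by
    intro j hj
    rw [List.count_cons, c2 j (by omega)]
    have : ((0 : Int) == j) = false := by rw [beq_eq_false_iff_ne]; omega
    rw [this]
    simp
  -- membership in the value multiset
  have hmemV : ∀ x : Int, x ∈ (0 :: E.map Prod.snd) ↔ (0 ≤ x ∧ x.toNat < L.length) := by
    intro x
    constructor
    · intro hx
      by_cases hx0 : 0 ≤ x
      · refine ⟨hx0, ?_⟩
        have hpos : 0 < (0 :: E.map Prod.snd).count x := List.count_pos_iff.mpr hx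
        by_contra hge
        push Not at hge
        have hxc : x = ((x.toNat : Nat) : Int) := by omega
        have := hcount0 x.toNat
        rw [← hxc] at this
        rw [List.getD_eq_default _ _ hge] at this
        omega
      · exfalso
        have hpos : 0 < (0 :: E.map Prod.snd).count x := List.count_pos_iff.mpr hx
        rw [hcneg x (by omega)] at hpos
        omega
    · rintro ⟨hx0, hxlt⟩
      have hxc : x = ((x.toNat : Nat) : Int) := by omega
      rw [← List.count_pos_iff]
      have := hcount0 x.toNat
      rw [← hxc] at this
      have hget : L.getD x.toNat 0 = L[x.toNat]'hxlt := List.getD_eq_getElem _ _ hxlt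
      have hmem : L[x.toNat]'hxlt ∈ L := List.getElem_mem _
      have hp := c3 _ hmem
      omega
  -- max of the values is the number of levels minus one
  have hmax : (0 :: E.map Prod.snd).foldl (fun m x => if x > m then x else m) 0 =
      (L.length : Int) - 1 := by
    have hfn : (fun (m x : Int) => if x > m then x else m) = max := by
      funext m x
      rw [max_def_lt]
    rw [hfn]
    have h1 := PySem.List.le_foldl_max (0 :: E.map Prod.snd) 0
    have h2 := PySem.List.foldl_max_mem (0 :: E.map Prod.snd) 0
    have hub : ∀ y ∈ (0 :: E.map Prod.snd), y ≤ (L.length : Int) - 1 := by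
      intro y hy
      have := (hmemV y).mp hy
      omega
    have hmem : ((L.length : Int) - 1) ∈ (0 :: E.map Prod.snd) := by
      rw [hmemV]
      constructor
      · omega
      · omega
    have hge := h1.2 _ hmem
    rcases h2 with h2 | h2
    · have := hub 0 List.mem_cons_self
      omega
    · have := hub _ h2
      omega
  have hnodup' : (PySem.Dict.mk ((start, 0) :: E)).keys.Nodup := by
    have h := hnodup
    rw [hd0items] at h
    simpa using h
  -- assemble
  rw [halt]
  simp only [bfs_level_sizes]
  rw [hdist]
  have hsize : ((PySem.Dict.mk ((start, 0) :: E)).size == 0) = false := by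
    simp [PySem.Dict.size]
  rw [hsize]
  simp only [Bool.false_eq_true, if_false]
  rw [pvMaxFold_keys _ hnodup', hV, hmax]
  rw [pvIncFold_keys _ hnodup', hV]
  have hrange : ((L.length : Int) - 1 + 1) = (L.length : Int) := by ring
  rw [hrange]
  have hzs : (PySem.List.pyRange 0 (L.length : Int) 1).foldl (fun s _ => s ++ [(0 : Int)]) [] =
      List.replicate L.length (0 : Int) := by
    rw [PySem.List.foldl_append_singleton_eq_map (fun _ => (0 : Int))]
    rw [List.nil_append, List.map_const']
    congr 1
    rw [PySem.List.length_pyRange_one]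
    omega
  rw [hzs]
  have hdomV : ∀ x ∈ (0 :: E.map Prod.snd), 0 ≤ x ∧
      x.toNat < (List.replicate L.length (0 : Int)).length := by
    intro x hx
    have := (hmemV x).mp hx
    simpa using this
  obtain ⟨hflen, hfcnt⟩ := pvIncCounts (0 :: E.map Prod.snd) (List.replicate L.length (0 : Int))
    hdomV
  refine List.ext_getElem ?_ ?_
  · rw [hflen]
    simp
  · intro i h1 h2
    have hi : i < L.length := by
      rw [hflen] at h1
      simpa using h1
    have := hfcnt i (by simpa using hi)
    rw [List.getD_eq_getElem _ _ h1] at this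
    rw [this]
    have hrep : (List.replicate L.length (0 : Int)).getD i 0 = 0 := by
      rw [List.getD_eq_getElem _ _ (by simpa using hi)]
      simp
    rw [hrep, hcount0 i, List.getD_eq_getElem _ _ hi]
    simp

-- ===== VERDICT (by name: the statement is the Claim_ definition above) =====
theorem bfs_level_sizes_spec : Claim_equal_bfs_level_sizes := by
  intro graph start _
  unfold Spec_bfs_level_sizes
  exact bfs_level_sizes_spec_aux graph start
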